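-- pv_equiv track=rewrite | github.com/cline/cline | .github/scripts/version_manager.py | determine_version_bump
-- ===== SOURCE A (Python) =====
-- from typing import List, Tuple, Literal
--
-- ChangeType = Literal["major", "minor", "patch"]
--
-- def determine_version_bump(changesets: List[dict]) -> Tuple[ChangeType, int]:
--     """
--     Determine the minimum version bump needed based on all changesets.
--     Returns the bump type and count of changes.
--     """
--     has_major = any("major" in c["type"].lower() for c in changesets)
--     has_minor = any("minor" in c["type"].lower() for c in changesets)
--     has_patch = any("patch" in c["type"].lower() for c in changesets)
--
--     if has_major:
--         return "major", len(changesets)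
--     elif has_minor:
--         return "minor", len(changesets)
--     elif has_patch:
--         return "patch", len(changesets)
--     else:
--         return "patch", 0
-- ===== SOURCE B (Python) =====
-- def _severity(t):
--     """Rank a lowercased type string: major > minor > patch > none."""
--     if "major" in t:
--         return 3
--     if "minor" in t:
--         return 2
--     if "patch" in t:
--         return 1
--     return 0
--
-- def determine_version_bump(changesets):
--     """Reduce to the maximum per-changeset severity rank, then decode it."""
--     rank = max((_severity(c["type"].lower()) for c in changesets), default=0)
--     name = ("patch", "patch", "minor", "major")[rank]
--     return name, (len(changesets) if rank else 0)
-- ===== Notes on version B (the rewrite author's own statement) =====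
-- stated objective: alternative
-- what changed: Replaces the three any(...) substring scans plus a priority if-chain with a max-reduction: each changeset is mapped once to a numeric severity rank (major=3 > minor=2 > patch=1 > 0) and the overall maximum rank is decoded through a lookup table into the bump name and count.
import Mathlib
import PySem

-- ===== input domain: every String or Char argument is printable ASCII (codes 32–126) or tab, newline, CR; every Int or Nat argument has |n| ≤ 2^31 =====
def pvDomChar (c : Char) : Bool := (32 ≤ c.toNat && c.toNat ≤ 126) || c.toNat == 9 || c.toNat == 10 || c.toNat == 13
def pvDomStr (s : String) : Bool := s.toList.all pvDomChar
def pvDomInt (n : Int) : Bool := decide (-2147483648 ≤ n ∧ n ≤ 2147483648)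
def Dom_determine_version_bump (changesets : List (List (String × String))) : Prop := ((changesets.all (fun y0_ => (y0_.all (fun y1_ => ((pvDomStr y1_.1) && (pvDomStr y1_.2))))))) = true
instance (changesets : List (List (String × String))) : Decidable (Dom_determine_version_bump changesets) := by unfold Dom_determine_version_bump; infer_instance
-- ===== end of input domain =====

-- B replaces A's three any(...) scans plus priority if-chain by a max-reduction over numeric severity ranks decoded through a table (alternative algorithm, same cost class).

-- ===== PORT A =====
-- c["type"]: first-match lookup in the association list (dict); Pre_ guarantees the key exists.
def pvGetType (c : List (String × String)) : String :=
  ((c.find? (fun p => p.1 == "type")).map Prod.snd).getD ""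

def determine_version_bump (changesets : List (List (String × String))) : String × Int :=
  let has_major := changesets.any (fun c => PySem.Str.isIn "major" (PySem.Str.lower (pvGetType c)))
  let has_minor := changesets.any (fun c => PySem.Str.isIn "minor" (PySem.Str.lower (pvGetType c)))
  let has_patch := changesets.any (fun c => PySem.Str.isIn "patch" (PySem.Str.lower (pvGetType c)))
  if has_major then ("major", (changesets.length : Int))
  else if has_minor then ("minor", (changesets.length : Int))
  else if has_patch then ("patch", (changesets.length : Int))
  else ("patch", 0)

-- ===== PORT B =====
-- _severity of Source B
def pvSev (t : String) : Int :=
  if PySem.Str.isIn "major" t then 3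
  else if PySem.Str.isIn "minor" t then 2
  else if PySem.Str.isIn "patch" t then 1
  else 0

-- max(generator, default=0) over the severity of each changeset, then the table lookup;
-- rank is always in 0..3 so the pyGet? lookup never misses (the "" default is dead).
def determine_version_bump_alt (changesets : List (List (String × String))) : String × Int :=
  let rank := (changesets.map (fun c => pvSev (PySem.Str.lower (pvGetType c)))).foldl max 0
  let name := (PySem.List.pyGet? ["patch", "patch", "minor", "major"] rank).getD ""
  (name, if rank ≠ 0 then (changesets.length : Int) else 0)

-- ===== PRECONDITION & SPEC =====
-- Pre_ excludes exactly the inputs where Python raises KeyError: a changeset without a "type" key.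
def Pre_determine_version_bump (changesets : List (List (String × String))) : Prop :=
  (changesets.all (fun c => c.any (fun p => p.1 == "type"))) = true
instance (changesets : List (List (String × String))) : Decidable (Pre_determine_version_bump changesets) := by
  unfold Pre_determine_version_bump; infer_instance
def pvWitness_determine_version_bump : (List (List (String × String))) := [[("type", "minor")]]

def Spec_determine_version_bump (changesets : List (List (String × String))) (out : String × Int) : Prop := out = determine_version_bump_alt changesets
instance (changesets : List (List (String × String))) (out : String × Int) : Decidable (Spec_determine_version_bump changesets out) := by unfold Spec_determine_version_bump; infer_instance

-- ===== CLAIM (what is proved, stated in full; the proofs are below) =====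
def Claim_equal_determine_version_bump : Prop := ∀ (changesets : List (List (String × String))), Dom_determine_version_bump changesets → Pre_determine_version_bump changesets → Spec_determine_version_bump changesets (determine_version_bump changesets)

-- ===== LEMMAS AND PROOFS =====

-- the max-fold over severities (started at any accumulator ≥ 0) equals the if-chain over A's three any-scans
theorem pvMaxRank_eq (changesets : List (List (String × String))) (a : Int) (ha : 0 ≤ a) :
    ((changesets.map (fun c => pvSev (PySem.Str.lower (pvGetType c)))).foldl max a) =
      (if changesets.any (fun c => PySem.Str.isIn "major" (PySem.Str.lower (pvGetType c))) then max a 3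
       else if changesets.any (fun c => PySem.Str.isIn "minor" (PySem.Str.lower (pvGetType c))) then max a 2
       else if changesets.any (fun c => PySem.Str.isIn "patch" (PySem.Str.lower (pvGetType c))) then max a 1
       else a) := by
  induction changesets generalizing a with
  | nil => simp
  | cons hd tl ih =>
    simp only [List.map_cons, List.foldl_cons, List.any_cons]
    rw [ih _ (by unfold pvSev; split_ifs <;> omega)]
    simp only [pvSev]
    by_cases h1 : PySem.Str.isIn "major" (PySem.Str.lower (pvGetType hd)) = true <;>
    by_cases h2 : PySem.Str.isIn "minor" (PySem.Str.lower (pvGetType hd)) = true <;>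
    by_cases h3 : PySem.Str.isIn "patch" (PySem.Str.lower (pvGetType hd)) = true <;>
      simp only [Bool.not_eq_true] at h1 h2 h3 <;>
      simp only [h1, h2, h3, Bool.false_or, Bool.true_or, if_true, if_false, Bool.false_eq_true] <;>
      split_ifs <;> omega

theorem determine_version_bump_spec : Claim_equal_determine_version_bump := by
  intro changesets _ _
  unfold Spec_determine_version_bump determine_version_bump determine_version_bump_alt
  rw [pvMaxRank_eq _ _ le_rfl]
  by_cases hM : changesets.any (fun c => PySem.Str.isIn "major" (PySem.Str.lower (pvGetType c))) = true <;>
  by_cases hm : changesets.any (fun c => PySem.Str.isIn "minor" (PySem.Str.lower (pvGetType c))) = true <;>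
  by_cases hp : changesets.any (fun c => PySem.Str.isIn "patch" (PySem.Str.lower (pvGetType c))) = true <;>
    simp only [Bool.not_eq_true] at hM hm hp <;>
    simp only [hM, hm, hp, if_true, if_false, Bool.false_eq_true] <;>
    norm_num [PySem.List.pyGet?, PySem.List.pyIdx?] <;> rfl
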